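-- pv_equiv track=rewrite | github.com/LimJih00n/CODE_TEST | 250322/고대 문명 유적 탐사/ancient-ruin-exploration.py | compute_tresure
-- ===== SOURCE A (Python) =====
-- import collections
--
-- def check_b(r,c):
--     if r>=0 and c>=0 and r<5 and c<5:
--         return True
--     return False
--
-- def compute_tresure(arr): # 모든 map 탐색.
--     tem_count=0
--     tot_count = 0
--     queue = collections.deque()
--     visted = [[False]*5 for i in range(5)]
--     # 얼마나 같은 수로 연속하고 있는지 넣기기
--
--
--     dr = [1,-1,0,0]
--     dc = [0,0,1,-1]
--
--
--
--
--     def dfs(r,c,value,path):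
--         if not check_b(r,c) or visted[r][c] or value != arr[r][c]:
--             return
--         visted[r][c] = True
--
--         path.append((r,c))
--         for sr,sc in zip(dr,dc):
--             dfs(r+sr,c+sc,value,path)
--
--
--     trea_region = []
--
--     for i in range(5):
--         for j in range(5):
--             if not visted[i][j]:
--
--                 path=[]
--                 dfs(i,j,arr[i][j],path)
--                 if len(path)>=3:
--                     trea_region += path
--                     tot_count += len(path)
--     return tot_count,trea_region
-- ===== SOURCE B (Python) =====
-- def compute_tresure(arr):
--     dr = [1, -1, 0, 0]
--     dc = [0, 0, 1, -1]
--     visited = [[False] * 5 for _ in range(5)]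
--     tot_count = 0
--     trea_region = []
--     for i in range(5):
--         for j in range(5):
--             if not visited[i][j]:
--                 value = arr[i][j]
--                 path = []
--                 stack = [(i, j)]
--                 while stack:
--                     r, c = stack.pop()
--                     if not (0 <= r < 5 and 0 <= c < 5) or visited[r][c] or arr[r][c] != value:
--                         continue
--                     visited[r][c] = True
--                     path.append((r, c))
--                     for k in range(3, -1, -1):
--                         stack.append((r + dr[k], c + dc[k]))
--                 if len(path) >= 3:
--                     trea_region += path
--                     tot_count += len(path)
--     return tot_count, trea_region
-- ===== Notes on version B (the rewrite author's own statement) =====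
-- stated objective: alternative
-- what changed: The recursive inner dfs is replaced by an iterative flood fill with an explicit stack (check-at-pop, neighbors pushed in reverse so the DFS preorder is preserved); no recursion and no check_b helper remain.
import Mathlib
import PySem

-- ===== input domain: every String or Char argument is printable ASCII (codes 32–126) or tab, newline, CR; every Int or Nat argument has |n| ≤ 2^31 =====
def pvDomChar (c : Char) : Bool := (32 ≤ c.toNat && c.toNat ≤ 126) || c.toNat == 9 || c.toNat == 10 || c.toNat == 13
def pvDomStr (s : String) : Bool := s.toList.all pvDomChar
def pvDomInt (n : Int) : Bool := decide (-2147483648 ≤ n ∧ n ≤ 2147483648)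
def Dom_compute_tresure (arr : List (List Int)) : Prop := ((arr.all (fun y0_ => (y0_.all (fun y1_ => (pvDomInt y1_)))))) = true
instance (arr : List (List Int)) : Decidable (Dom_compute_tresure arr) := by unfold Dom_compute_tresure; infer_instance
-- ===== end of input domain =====

-- B replaces A's recursive dfs by an iterative explicit-stack flood fill (same preorder); equivalence of return values is proved on Pre_ (grids where Python A raises no IndexError).

-- arr[r][c] (in both Pythons only evaluated with 0 ≤ r,c < 5 and, under Pre_, in range)
def pvCell (arr : List (List Int)) (r c : Int) : Int :=
  PySem.List.pyGetD (PySem.List.pyGetD arr r []) c 0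

-- the 25 cells (i, j) of the two nested range(5) loops, row-major
def pvCells25 : List (Int × Int) :=
  [(0, 0), (0, 1), (0, 2), (0, 3), (0, 4),
   (1, 0), (1, 1), (1, 2), (1, 3), (1, 4),
   (2, 0), (2, 1), (2, 2), (2, 3), (2, 4),
   (3, 0), (3, 1), (3, 2), (3, 3), (3, 4),
   (4, 0), (4, 1), (4, 2), (4, 3), (4, 4)]

-- ===== PORT A =====
def check_b (r c : Int) : Bool :=
  decide (0 ≤ r) && decide (0 ≤ c) && decide (r < 5) && decide (c < 5)

-- A's recursive dfs; visited is the list of marked cells; fuel 26 always suffices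
-- (recursion depth is bounded by the 25 grid cells each nested call has newly marked).
def dfsA (arr : List (List Int)) :
    Nat → Int → Int → Int → List (Int × Int) → List (Int × Int) →
    List (Int × Int) × List (Int × Int)
  | 0, _, _, _, vis, path => (vis, path)
  | f + 1, r, c, v, vis, path =>
    if ¬ check_b r c = true ∨ (r, c) ∈ vis ∨ v ≠ pvCell arr r c then (vis, path)
    else
      let vis1 := (r, c) :: vis
      let path1 := path ++ [(r, c)]
      let s1 := dfsA arr f (r + 1) c v vis1 path1
      let s2 := dfsA arr f (r - 1) c v s1.1 s1.2
      let s3 := dfsA arr f r (c + 1) v s2.1 s2.2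
      dfsA arr f r (c - 1) v s3.1 s3.2

def compute_tresure (arr : List (List Int)) : Int × (List (Int × Int)) :=
  let res := pvCells25.foldl
    (fun (st : Int × List (Int × Int) × List (Int × Int)) ij =>
      if (ij.1, ij.2) ∈ st.2.2 then st
      else
        let d := dfsA arr 26 ij.1 ij.2 (pvCell arr ij.1 ij.2) st.2.2 []
        if 3 ≤ d.2.length then (st.1 + d.2.length, st.2.1 ++ d.2, d.1)
        else (st.1, st.2.1, d.1))
    (0, [], [])
  (res.1, res.2.1)

-- ===== PORT B =====
-- B's while-loop over the explicit stack; fuel 200 always suffices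
-- (pops are bounded by the initial stack plus 4 per marked cell: 1 + 4·25).
def loopB (arr : List (List Int)) (v : Int) :
    Nat → List (Int × Int) → List (Int × Int) → List (Int × Int) →
    List (Int × Int) × List (Int × Int)
  | 0, _, vis, path => (vis, path)
  | f + 1, stack, vis, path =>
    match stack with
    | [] => (vis, path)
    | (r, c) :: rest =>
      if ¬ (decide (0 ≤ r) && decide (r < 5) && decide (0 ≤ c) && decide (c < 5)) = true
          ∨ (r, c) ∈ vis ∨ pvCell arr r c ≠ v then
        loopB arr v f rest vis path
      else
        loopB arr v f ((r + 1, c) :: (r - 1, c) :: (r, c + 1) :: (r, c - 1) :: rest)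
          ((r, c) :: vis) (path ++ [(r, c)])

def compute_tresure_alt (arr : List (List Int)) : Int × (List (Int × Int)) :=
  let res := pvCells25.foldl
    (fun (st : Int × List (Int × Int) × List (Int × Int)) ij =>
      if (ij.1, ij.2) ∈ st.2.2 then st
      else
        let d := loopB arr (pvCell arr ij.1 ij.2) 200 [(ij.1, ij.2)] st.2.2 []
        if 3 ≤ d.2.length then (st.1 + d.2.length, st.2.1 ++ d.2, d.1)
        else (st.1, st.2.1, d.1))
    (0, [], [])
  (res.1, res.2.1)

-- ===== PRECONDITION & SPEC =====
-- Pre_ holds exactly when Python A returns: it raises IndexError iff the grid has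
-- fewer than 5 rows or one of the first 5 rows has fewer than 5 entries.
def Pre_compute_tresure (arr : List (List Int)) : Prop :=
  5 ≤ arr.length ∧ ∀ row ∈ arr.take 5, 5 ≤ row.length
instance (arr : List (List Int)) : Decidable (Pre_compute_tresure arr) := by
  unfold Pre_compute_tresure; infer_instance

def pvWitness_compute_tresure : List (List Int) :=
  [[1, 1, 0, 0, 2], [1, 1, 0, 2, 2], [0, 0, 0, 2, 0], [3, 3, 0, 0, 0], [3, 3, 4, 4, 4]]

def Spec_compute_tresure (arr : List (List Int)) (out : Int × (List (Int × Int))) : Prop := out = compute_tresure_alt arr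
instance (arr : List (List Int)) (out : Int × (List (Int × Int))) : Decidable (Spec_compute_tresure arr out) := by unfold Spec_compute_tresure; infer_instance

-- ===== CLAIM (what is proved, stated in full; the proofs are below) =====
def Claim_equal_compute_tresure : Prop := ∀ (arr : List (List Int)), Dom_compute_tresure arr → Pre_compute_tresure arr → Spec_compute_tresure arr (compute_tresure arr)

-- ===== LEMMAS AND PROOFS =====

-- number of still-unvisited grid cells
def Ucnt (vis : List (Int × Int)) : Nat :=
  (pvCells25.filter (fun x => !decide (x ∈ vis))).length

theorem Ucnt_le (vis : List (Int × Int)) : Ucnt vis ≤ 25 := by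
  have h := List.length_filter_le (fun x => !decide (x ∈ vis)) pvCells25
  have h25 : pvCells25.length = 25 := by decide
  unfold Ucnt
  omega

theorem Ucnt_filter_mono (l : List (Int × Int)) (x : Int × Int) (vis : List (Int × Int)) :
    (l.filter (fun y => !decide (y ∈ x :: vis))).length ≤ (l.filter (fun y => !decide (y ∈ vis))).length := by
  induction l with
  | nil => simp
  | cons a l ih =>
    simp only [List.filter_cons]
    by_cases h1 : a ∈ x :: vis
    · rw [decide_eq_true h1]
      by_cases h2 : a ∈ vis
      · rw [decide_eq_true h2]
        simpa using ih
      · rw [decide_eq_false h2]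
        simp only [Bool.not_true, Bool.not_false, Bool.false_eq_true, if_false, if_true, List.length_cons]
        omega
    · have h2 : a ∉ vis := fun hm => h1 (List.mem_cons_of_mem _ hm)
      rw [decide_eq_false h1, decide_eq_false h2]
      simp only [Bool.not_false, if_true, List.length_cons]
      omega

theorem Ucnt_cons_le (x : Int × Int) (vis : List (Int × Int)) : Ucnt (x :: vis) ≤ Ucnt vis :=
  Ucnt_filter_mono pvCells25 x vis

theorem Ucnt_filter_lt (l : List (Int × Int)) (x : Int × Int) (vis : List (Int × Int))
    (hx : x ∈ l) (hv : x ∉ vis) :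
    (l.filter (fun y => !decide (y ∈ x :: vis))).length < (l.filter (fun y => !decide (y ∈ vis))).length := by
  induction l with
  | nil => cases hx
  | cons a l ih =>
    simp only [List.filter_cons]
    rcases List.mem_cons.mp hx with hax | hxl
    · subst hax
      rw [decide_eq_true (List.mem_cons_self), decide_eq_false hv]
      simp only [Bool.not_true, Bool.not_false, Bool.false_eq_true, if_false, if_true, List.length_cons]
      exact Nat.lt_succ_of_le (Ucnt_filter_mono l x vis)
    · by_cases h1 : a ∈ x :: vis
      · rw [decide_eq_true h1]
        by_cases h2 : a ∈ vis
        · rw [decide_eq_true h2]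
          simpa using ih hxl
        · rw [decide_eq_false h2]
          simp only [Bool.not_true, Bool.not_false, Bool.false_eq_true, if_false, if_true, List.length_cons]
          have := Ucnt_filter_mono l x vis
          omega
      · have h2 : a ∉ vis := fun hm => h1 (List.mem_cons_of_mem _ hm)
        rw [decide_eq_false h1, decide_eq_false h2]
        simp only [Bool.not_false, if_true, List.length_cons]
        exact Nat.succ_lt_succ (ih hxl)

theorem Ucnt_cons_lt (x : Int × Int) (vis : List (Int × Int)) (hx : x ∈ pvCells25) (hv : x ∉ vis) :
    Ucnt (x :: vis) < Ucnt vis :=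
  Ucnt_filter_lt pvCells25 x vis hx hv

theorem mem_cells25 (r c : Int) (h : check_b r c = true) : (r, c) ∈ pvCells25 := by
  simp only [check_b, Bool.and_eq_true, decide_eq_true_eq] at h
  obtain ⟨⟨⟨h1, h2⟩, h3⟩, h4⟩ := h
  interval_cases r <;> interval_cases c <;> decide

-- dfsA never increases the unvisited count
theorem dfsA_U (arr : List (List Int)) :
    ∀ f r c v vis path, Ucnt (dfsA arr f r c v vis path).1 ≤ Ucnt vis := by
  intro f
  induction f with
  | zero => intro r c v vis path; simp [dfsA]
  | succ f ih =>
    intro r c v vis path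
    simp only [dfsA]
    split
    · exact Nat.le_refl _
    · next hcond =>
      push_neg at hcond
      calc Ucnt (dfsA arr f r (c - 1) v _ _).1
          ≤ _ := ih _ _ _ _ _
        _ ≤ _ := ih _ _ _ _ _
        _ ≤ _ := ih _ _ _ _ _
        _ ≤ _ := ih _ _ _ _ _
        _ ≤ Ucnt vis := Ucnt_cons_le _ _

-- fuel irrelevance for dfsA, once fuel exceeds the unvisited count
theorem dfsA_fuel (arr : List (List Int)) :
    ∀ f g r c v vis path, Ucnt vis < f → Ucnt vis < g →
      dfsA arr f r c v vis path = dfsA arr g r c v vis path := by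
  intro f
  induction f with
  | zero => intro g r c v vis path hf; omega
  | succ f ih =>
    intro g r c v vis path hf hg
    cases g with
    | zero => omega
    | succ g =>
      simp only [dfsA]
      split
      · rfl
      · next hcond =>
        push_neg at hcond
        obtain ⟨hb, hmem, _⟩ := hcond
        have hU : Ucnt ((r, c) :: vis) < Ucnt vis :=
          Ucnt_cons_lt _ _ (mem_cells25 r c hb) hmem
        have hUf : Ucnt ((r, c) :: vis) < f := by omega
        have hUg : Ucnt ((r, c) :: vis) < g := by omega
        have e1 := ih g (r + 1) c v ((r, c) :: vis) (path ++ [(r, c)]) hUf hUg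
        have u1 := dfsA_U arr f (r + 1) c v ((r, c) :: vis) (path ++ [(r, c)])
        rw [e1]
        set s1 := dfsA arr g (r + 1) c v ((r, c) :: vis) (path ++ [(r, c)]) with hs1
        have u1' : Ucnt s1.1 ≤ Ucnt ((r, c) :: vis) := e1 ▸ u1
        have e2 := ih g (r - 1) c v s1.1 s1.2 (by omega) (by omega)
        rw [e2]
        set s2 := dfsA arr g (r - 1) c v s1.1 s1.2 with hs2
        have u2' : Ucnt s2.1 ≤ Ucnt s1.1 := e2 ▸ dfsA_U arr f (r - 1) c v s1.1 s1.2
        have e3 := ih g r (c + 1) v s2.1 s2.2 (by omega) (by omega)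
        rw [e3]
        set s3 := dfsA arr g r (c + 1) v s2.1 s2.2 with hs3
        have u3' : Ucnt s3.1 ≤ Ucnt s2.1 := e3 ▸ dfsA_U arr f r (c + 1) v s2.1 s2.2
        exact ih g r (c - 1) v s3.1 s3.2 (by omega) (by omega)

theorem check_b_eq (r c : Int) :
    (decide (0 ≤ r) && decide (r < 5) && decide (0 ≤ c) && decide (c < 5)) = check_b r c := by
  by_cases h1 : (0:Int) ≤ r <;> by_cases h2 : r < 5 <;> by_cases h3 : (0:Int) ≤ c <;>
    by_cases h4 : c < 5 <;> simp [check_b, h1, h2, h3, h4]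

-- one-step unfolding lemmas (avoid unfolding literal fuel all the way down)
theorem dfsA_succ (arr : List (List Int)) (f : Nat) (r c v : Int) (vis path : List (Int × Int)) :
    dfsA arr (f + 1) r c v vis path =
      if ¬ check_b r c = true ∨ (r, c) ∈ vis ∨ v ≠ pvCell arr r c then (vis, path)
      else
        let vis1 := (r, c) :: vis
        let path1 := path ++ [(r, c)]
        let s1 := dfsA arr f (r + 1) c v vis1 path1
        let s2 := dfsA arr f (r - 1) c v s1.1 s1.2
        let s3 := dfsA arr f r (c + 1) v s2.1 s2.2
        dfsA arr f r (c - 1) v s3.1 s3.2 := rfl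

theorem loopB_nil (arr : List (List Int)) (v : Int) (f : Nat) (vis path : List (Int × Int)) :
    loopB arr v (f + 1) [] vis path = (vis, path) := rfl

theorem loopB_cons (arr : List (List Int)) (v : Int) (f : Nat) (r c : Int)
    (rest vis path : List (Int × Int)) :
    loopB arr v (f + 1) ((r, c) :: rest) vis path =
      if ¬ (decide (0 ≤ r) && decide (r < 5) && decide (0 ≤ c) && decide (c < 5)) = true
          ∨ (r, c) ∈ vis ∨ pvCell arr r c ≠ v then
        loopB arr v f rest vis path
      else
        loopB arr v f ((r + 1, c) :: (r - 1, c) :: (r, c + 1) :: (r, c - 1) :: rest)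
          ((r, c) :: vis) (path ++ [(r, c)]) := rfl

-- proof-side abbreviation: one dfs launched with always-sufficient fuel
def dstep (arr : List (List Int)) (v : Int) (s : List (Int × Int) × List (Int × Int))
    (rc : Int × Int) : List (Int × Int) × List (Int × Int) :=
  dfsA arr 26 rc.1 rc.2 v s.1 s.2

-- the bridge: B's stack loop computes the left fold of A's dfs over the stack
theorem bridge (arr : List (List Int)) (v : Int) :
    ∀ f stack vis path, stack.length + 4 * Ucnt vis < f →
      loopB arr v f stack vis path = stack.foldl (dstep arr v) (vis, path) := by
  intro f
  induction f with
  | zero => intro stack vis path h; omega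
  | succ f ih =>
    intro stack vis path h
    match stack with
    | [] => rw [loopB_nil]; rfl
    | (r, c) :: rest =>
      rw [loopB_cons, check_b_eq]
      simp only [List.foldl_cons]
      by_cases hcond : ¬ check_b r c = true ∨ (r, c) ∈ vis ∨ pvCell arr r c ≠ v
      · rw [if_pos hcond]
        have hA : dfsA arr 26 r c v vis path = (vis, path) := by
          rw [show (26 : Nat) = 25 + 1 from rfl, dfsA_succ, if_pos]
          rcases hcond with h1 | h2 | h3
          · exact Or.inl h1
          · exact Or.inr (Or.inl h2)
          · exact Or.inr (Or.inr (fun he => h3 he.symm))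
        have hA' : dstep arr v (vis, path) (r, c) = (vis, path) := hA
        rw [hA']
        have hlen : rest.length + 4 * Ucnt vis < f := by
          simp only [List.length_cons] at h; omega
        exact ih rest vis path hlen
      · rw [if_neg hcond]
        push_neg at hcond
        obtain ⟨hb, hmem, hval⟩ := hcond
        have hU : Ucnt ((r, c) :: vis) < Ucnt vis :=
          Ucnt_cons_lt _ _ (mem_cells25 r c hb) hmem
        have hfuel : ((r + 1, c) :: (r - 1, c) :: (r, c + 1) :: (r, c - 1) :: rest).length
            + 4 * Ucnt ((r, c) :: vis) < f := by
          simp only [List.length_cons] at h ⊢; omega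
        rw [ih _ _ _ hfuel]
        simp only [List.foldl_cons]
        have h25 : Ucnt ((r, c) :: vis) < 25 := by have := Ucnt_le vis; omega
        have q1 : dfsA arr 25 (r + 1) c v ((r, c) :: vis) (path ++ [(r, c)]) = dfsA arr 26 (r + 1) c v ((r, c) :: vis) (path ++ [(r, c)]) :=
          dfsA_fuel arr 25 26 (r + 1) c v ((r, c) :: vis) (path ++ [(r, c)]) h25 (by omega)
        have u1 : Ucnt (dfsA arr 26 (r + 1) c v ((r, c) :: vis) (path ++ [(r, c)])).1 ≤ Ucnt ((r, c) :: vis) :=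
          dfsA_U arr 26 (r + 1) c v ((r, c) :: vis) (path ++ [(r, c)])
        have q2 : dfsA arr 25 (r - 1) c v (dfsA arr 25 (r + 1) c v ((r, c) :: vis) (path ++ [(r, c)])).1 (dfsA arr 25 (r + 1) c v ((r, c) :: vis) (path ++ [(r, c)])).2 = dfsA arr 26 (r - 1) c v (dfsA arr 26 (r + 1) c v ((r, c) :: vis) (path ++ [(r, c)])).1 (dfsA arr 26 (r + 1) c v ((r, c) :: vis) (path ++ [(r, c)])).2 := by
          rw [q1]
          exact dfsA_fuel arr 25 26 (r - 1) c v (dfsA arr 26 (r + 1) c v ((r, c) :: vis) (path ++ [(r, c)])).1 (dfsA arr 26 (r + 1) c v ((r, c) :: vis) (path ++ [(r, c)])).2 (by omega) (by omega)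
        have u2 : Ucnt (dfsA arr 26 (r - 1) c v (dfsA arr 26 (r + 1) c v ((r, c) :: vis) (path ++ [(r, c)])).1 (dfsA arr 26 (r + 1) c v ((r, c) :: vis) (path ++ [(r, c)])).2).1 ≤ Ucnt (dfsA arr 26 (r + 1) c v ((r, c) :: vis) (path ++ [(r, c)])).1 :=
          dfsA_U arr 26 (r - 1) c v (dfsA arr 26 (r + 1) c v ((r, c) :: vis) (path ++ [(r, c)])).1 (dfsA arr 26 (r + 1) c v ((r, c) :: vis) (path ++ [(r, c)])).2
        have q3 : dfsA arr 25 r (c + 1) v (dfsA arr 25 (r - 1) c v (dfsA arr 25 (r + 1) c v ((r, c) :: vis) (path ++ [(r, c)])).1 (dfsA arr 25 (r + 1) c v ((r, c) :: vis) (path ++ [(r, c)])).2).1 (dfsA arr 25 (r - 1) c v (dfsA arr 25 (r + 1) c v ((r, c) :: vis) (path ++ [(r, c)])).1 (dfsA arr 25 (r + 1) c v ((r, c) :: vis) (path ++ [(r, c)])).2).2 = dfsA arr 26 r (c + 1) v (dfsA arr 26 (r - 1) c v (dfsA arr 26 (r + 1) c v ((r, c) :: vis) (path ++ [(r, c)])).1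 (dfsA arr 26 (r + 1) c v ((r, c) :: vis) (path ++ [(r, c)])).2).1 (dfsA arr 26 (r - 1) c v (dfsA arr 26 (r + 1) c v ((r, c) :: vis) (path ++ [(r, c)])).1 (dfsA arr 26 (r + 1) c v ((r, c) :: vis) (path ++ [(r, c)])).2).2 := by
          rw [q2]
          exact dfsA_fuel arr 25 26 r (c + 1) v (dfsA arr 26 (r - 1) c v (dfsA arr 26 (r + 1) c v ((r, c) :: vis) (path ++ [(r, c)])).1 (dfsA arr 26 (r + 1) c v ((r, c) :: vis) (path ++ [(r, c)])).2).1 (dfsA arr 26 (r - 1) c v (dfsA arr 26 (r + 1) c v ((r, c) :: vis) (path ++ [(r, c)])).1 (dfsA arr 26 (r + 1) c v ((r, c) :: vis) (path ++ [(r, c)])).2).2 (by omega) (by omega)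
        have u3 : Ucnt (dfsA arr 26 r (c + 1) v (dfsA arr 26 (r - 1) c v (dfsA arr 26 (r + 1) c v ((r, c) :: vis) (path ++ [(r, c)])).1 (dfsA arr 26 (r + 1) c v ((r, c) :: vis) (path ++ [(r, c)])).2).1 (dfsA arr 26 (r - 1) c v (dfsA arr 26 (r + 1) c v ((r, c) :: vis) (path ++ [(r, c)])).1 (dfsA arr 26 (r + 1) c v ((r, c) :: vis) (path ++ [(r, c)])).2).2).1 ≤ Ucnt (dfsA arr 26 (r - 1) c v (dfsA arr 26 (r + 1) c v ((r, c) :: vis) (path ++ [(r, c)])).1 (dfsA arr 26 (r + 1) c v ((r, c) :: vis) (path ++ [(r, c)])).2).1 :=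
          dfsA_U arr 26 r (c + 1) v (dfsA arr 26 (r - 1) c v (dfsA arr 26 (r + 1) c v ((r, c) :: vis) (path ++ [(r, c)])).1 (dfsA arr 26 (r + 1) c v ((r, c) :: vis) (path ++ [(r, c)])).2).1 (dfsA arr 26 (r - 1) c v (dfsA arr 26 (r + 1) c v ((r, c) :: vis) (path ++ [(r, c)])).1 (dfsA arr 26 (r + 1) c v ((r, c) :: vis) (path ++ [(r, c)])).2).2
        have q4 : dfsA arr 25 r (c - 1) v (dfsA arr 25 r (c + 1) v (dfsA arr 25 (r - 1) c v (dfsA arr 25 (r + 1) c v ((r, c) :: vis) (path ++ [(r, c)])).1 (dfsA arr 25 (r + 1) c v ((r, c) :: vis) (path ++ [(r, c)])).2).1 (dfsA arr 25 (r - 1) c v (dfsA arr 25 (r + 1) c v ((r, c) :: vis) (path ++ [(r, c)])).1 (dfsA arr 25 (r + 1) c v ((r, c) :: vis) (path ++ [(r, c)])).2).2).1 (dfsA arr 25 r (c + 1) v (dfsA arr 25 (r - 1) c v (dfsA arr 25 (r + 1) c v ((r, c) :: vis) (path ++ [(r, c)])).1 (dfsA arr 25 (r + 1) c v ((r, c)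 :: vis) (path ++ [(r, c)])).2).1 (dfsA arr 25 (r - 1) c v (dfsA arr 25 (r + 1) c v ((r, c) :: vis) (path ++ [(r, c)])).1 (dfsA arr 25 (r + 1) c v ((r, c) :: vis) (path ++ [(r, c)])).2).2).2 = dfsA arr 26 r (c - 1) v (dfsA arr 26 r (c + 1) v (dfsA arr 26 (r - 1) c v (dfsA arr 26 (r + 1) c v ((r, c) :: vis) (path ++ [(r, c)])).1 (dfsA arr 26 (r + 1) c v ((r, c) :: vis) (path ++ [(r, c)])).2).1 (dfsA arr 26 (r - 1) c v (dfsA arr 26 (r + 1) c v ((r, c) :: vis) (path ++ [(r, c)])).1 (dfsA arr 26 (r + 1) c v ((r, c) :: vis) (path ++ [(r, c)])).2).2).1 (dfsA arr 26 r (c + 1) v (dfsA arr 26 (r - 1) c v (dfsA arr 26 (r + 1) c v ((r, c) :: vis) (path ++ [(r, c)])).1 (dfsA arr 26 (r + 1) c v ((r, c) :: vis) (path ++ [(r, c)])).2).1 (dfsA arr 26 (r - 1) c v (dfsA arr 26 (r + 1) c v ((r, c) :: vis) (path ++ [(r, c)])).1 (dfsA arr 26 (r + 1) c v ((r, c) ::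 vis) (path ++ [(r, c)])).2).2).2 := by
          rw [q3]
          exact dfsA_fuel arr 25 26 r (c - 1) v (dfsA arr 26 r (c + 1) v (dfsA arr 26 (r - 1) c v (dfsA arr 26 (r + 1) c v ((r, c) :: vis) (path ++ [(r, c)])).1 (dfsA arr 26 (r + 1) c v ((r, c) :: vis) (path ++ [(r, c)])).2).1 (dfsA arr 26 (r - 1) c v (dfsA arr 26 (r + 1) c v ((r, c) :: vis) (path ++ [(r, c)])).1 (dfsA arr 26 (r + 1) c v ((r, c) :: vis) (path ++ [(r, c)])).2).2).1 (dfsA arr 26 r (c + 1) v (dfsA arr 26 (r - 1) c v (dfsA arr 26 (r + 1) c v ((r, c) :: vis) (path ++ [(r, c)])).1 (dfsA arr 26 (r + 1) c v ((r, c) :: vis) (path ++ [(r, c)])).2).1 (dfsA arr 26 (r - 1) c v (dfsA arr 26 (r + 1) c v ((r, c) :: vis) (path ++ [(r, c)])).1 (dfsA arr 26 (r + 1) c v ((r, c) :: vis) (path ++ [(r, c)])).2).2).2 (by omega) (by omega)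
        have hA : dfsA arr 26 r c v vis path =
            (let s1 := dfsA arr 26 (r + 1) c v ((r, c) :: vis) (path ++ [(r, c)])
             let s2 := dfsA arr 26 (r - 1) c v s1.1 s1.2
             let s3 := dfsA arr 26 r (c + 1) v s2.1 s2.2
             dfsA arr 26 r (c - 1) v s3.1 s3.2) := by
          conv_lhs => rw [show (26 : Nat) = 25 + 1 from rfl, dfsA_succ]
          rw [if_neg (by push_neg; exact ⟨hb, hmem, hval.symm⟩)]
          exact q4
        have hA' : dstep arr v (vis, path) (r, c) =
            dstep arr v (dstep arr v (dstep arr v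
              (dstep arr v ((r, c) :: vis, path ++ [(r, c)]) (r + 1, c)) (r - 1, c)) (r, c + 1))
              (r, c - 1) := hA
        rw [hA']

theorem percell (arr : List (List Int)) (v i j : Int) (vis path : List (Int × Int)) :
    loopB arr v 200 [(i, j)] vis path = dfsA arr 26 i j v vis path := by
  have h : ([(i, j)] : List (Int × Int)).length + 4 * Ucnt vis < 200 := by
    have := Ucnt_le vis
    simp only [List.length_cons, List.length_nil]
    omega
  rw [bridge arr v 200 [(i, j)] vis path h]
  simp only [List.foldl_cons, List.foldl_nil]
  rfl

theorem foldl_ptwise {A B : Type} (f g : A -> B -> A) (h : ∀ a b, f a b = g a b) :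
    ∀ (l : List B) (a : A), l.foldl f a = l.foldl g a := by
  intro l
  induction l with
  | nil => intro a; rfl
  | cons x l ih => intro a; rw [List.foldl_cons, List.foldl_cons, h, ih]

-- ===== VERDICT (by name: the statement is the Claim_ definition above) =====
theorem compute_tresure_spec : Claim_equal_compute_tresure := by
  intro arr _ _
  unfold Spec_compute_tresure compute_tresure compute_tresure_alt
  refine congrArg (fun res : Int × List (Int × Int) × List (Int × Int) => (res.1, res.2.1)) ?_
  refine foldl_ptwise _ _ ?_ pvCells25 (0, [], [])
  intro st ij
  rw [percell]
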